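-- pv_equiv track=rewrite | github.com/Pokecraft-exe/Light-Script | light_script.py | lastline
-- ===== SOURCE A (Python) =====
-- def lastline(string, sub):
--     args = [""]
--     alist = 0
--     for i in range(len(string)):
--         if string[i] == '\n':
--             args.append("")
--             alist = alist + 1
--         else:
--             args[alist] = args[alist] + string[i]
--     for i in range(len(args)-1):
--         if args[i].find(sub) != -1:
--             return i
-- ===== SOURCE B (Python) =====
-- def lastline(string, sub):
--     # one global search instead of splitting into lines and scanning each
--     if '\n' in sub:
--         return None
--     pos = string.find(sub)
--     if pos == -1:
--         return None
--     line = string[:pos].count('\n')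
--     if line == string.count('\n'):
--         return None
--     return line
-- ===== Notes on version B (the rewrite author's own statement) =====
-- stated objective: faster
-- what changed: Instead of building every line by per-character string concatenation and running find on each line but the last, B does one global find and derives the line index by counting newlines before the match (returning None if the match lies on the last line or sub contains a newline).
import Mathlib
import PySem

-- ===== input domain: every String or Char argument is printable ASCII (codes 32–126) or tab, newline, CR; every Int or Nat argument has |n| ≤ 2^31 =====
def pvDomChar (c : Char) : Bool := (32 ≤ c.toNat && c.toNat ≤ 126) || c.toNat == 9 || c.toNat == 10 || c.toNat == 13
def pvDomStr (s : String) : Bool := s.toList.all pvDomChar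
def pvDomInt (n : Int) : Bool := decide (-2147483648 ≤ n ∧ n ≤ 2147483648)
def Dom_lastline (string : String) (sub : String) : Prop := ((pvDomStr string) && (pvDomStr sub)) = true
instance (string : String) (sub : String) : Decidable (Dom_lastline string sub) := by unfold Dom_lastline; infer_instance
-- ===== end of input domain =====

-- B replaces A's per-line split-and-scan with one global find plus newline counts (same return value, proved below).

-- ===== PORT A =====
-- first loop of A: per character, either open a new empty line (args.append("")) or
-- append the character to the current line (args[alist] = args[alist] + string[i])
def lastlineStep (st : List (List Char) × Nat) (c : Char) : List (List Char) × Nat :=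
  if c = '\n' then (st.1 ++ [[]], st.2 + 1)
  else (st.1.set st.2 ((st.1.getD st.2 []) ++ [c]), st.2)

-- second loop of A: 'for i in range(len(args)-1): if args[i].find(sub) != -1: return i'
-- (the loop visits args[0..len(args)-2], i.e. every line but the last, in order, with an early return,
-- so it is transcribed as a recursion over those lines carrying the running index i)
def lastlineScan (sub : List Char) : List (List Char) → Int → Option Int
  | [], _ => none
  | line :: rest, i =>
      if PySem.Chars.find line sub ≠ -1 then some i else lastlineScan sub rest (i + 1)

def lastline (string : String) (sub : String) : Option Int :=
  let st := string.toList.foldl lastlineStep ([[]], 0)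
  lastlineScan sub.toList st.1.dropLast 0

-- ===== PORT B =====
-- Source B: if '\n' in sub: None; pos = string.find(sub); if pos == -1: None;
--       line = string[:pos].count('\n'); if line == string.count('\n'): None; else line
def lastline_alt (string : String) (sub : String) : Option Int :=
  let s := string.toList
  let sb := sub.toList
  if PySem.Chars.isIn ['\n'] sb then none
  else
    let pos := PySem.Chars.find s sb
    if pos = -1 then none
    else
      let line : Int := (PySem.Chars.count (PySem.List.slice s none (some pos)) ['\n'] : Int)
      if line = (PySem.Chars.count s ['\n'] : Int) then none
      else some line

-- ===== PRECONDITION & SPEC =====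
def Spec_lastline (string : String) (sub : String) (out : Option Int) : Prop := out = lastline_alt string sub
instance (string : String) (sub : String) (out : Option Int) : Decidable (Spec_lastline string sub out) := by unfold Spec_lastline; infer_instance

-- ===== CLAIM (what is proved, stated in full; the proofs are below) =====
def Claim_equal_lastline : Prop := ∀ (string : String) (sub : String), Dom_lastline string sub → Spec_lastline string sub (lastline string sub)

-- ===== LEMMAS AND PROOFS =====

-- the list of lines A's first loop builds: the string split on '\n'
def splitNL : List Char → List (List Char)
  | [] => [[]]
  | c :: t =>
      if c = '\n' then [] :: splitNL t
      else
        match splitNL t with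
        | [] => [[c]]
        | h :: r => (c :: h) :: r

theorem splitNL_ne_nil (s : List Char) : splitNL s ≠ [] := by
  cases s with
  | nil => simp [splitNL]
  | cons c t =>
    simp only [splitNL]
    split
    · simp
    · split <;> simp

theorem splitNL_no_nl (s : List Char) (h : '\n' ∉ s) : splitNL s = [s] := by
  induction s with
  | nil => rfl
  | cons c t ih =>
    simp only [List.mem_cons, not_or] at h
    rw [splitNL, if_neg (Ne.symm h.1), ih h.2]

theorem splitNL_break (l₀ rest : List Char) (h : '\n' ∉ l₀) :
    splitNL (l₀ ++ '\n' :: rest) = l₀ :: splitNL rest := by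
  induction l₀ with
  | nil => simp [splitNL]
  | cons c t ih =>
    simp only [List.mem_cons, not_or] at h
    rw [List.cons_append, splitNL, if_neg (Ne.symm h.1), ih h.2]

theorem mem_splitNL_no_nl (s : List Char) (l : List Char) (h : l ∈ splitNL s) : '\n' ∉ l := by
  induction s generalizing l with
  | nil => simp [splitNL] at h; simp [h]
  | cons c t ih =>
    rw [splitNL] at h
    by_cases hc : c = '\n'
    · rw [if_pos hc] at h
      rcases List.mem_cons.mp h with rfl | h
      · simp
      · exact ih l h
    · rw [if_neg hc] at h
      rcases hsp : splitNL t with _ | ⟨h0, r⟩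
      · exact absurd hsp (splitNL_ne_nil t)
      · rw [hsp] at h
        rcases List.mem_cons.mp h with rfl | h
        · have := ih h0 (by rw [hsp]; exact List.mem_cons_self)
          simp only [List.mem_cons, not_or]
          exact ⟨Ne.symm hc, this⟩
        · exact ih l (by rw [hsp]; exact List.mem_cons_of_mem _ h)

theorem exists_split {s : List Char} (hs : '\n' ∈ s) :
    ∃ l₀ rest, s = l₀ ++ '\n' :: rest ∧ '\n' ∉ l₀ := by
  induction s with
  | nil => simp at hs
  | cons c t ih =>
    by_cases hc : c = '\n'
    · exact ⟨[], t, by simp [hc], by simp⟩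
    · have ht : '\n' ∈ t := by
        rcases List.mem_cons.mp hs with e | h
        · exact absurd e.symm hc
        · exact h
      obtain ⟨l₀, rest, rfl, hnl⟩ := ih ht
      exact ⟨c :: l₀, rest, rfl, by simp [hnl, Ne.symm hc]⟩

-- prepend cur to the head line (the shape of the fold's intermediate state)
def consHead (cur : List Char) : List (List Char) → List (List Char)
  | [] => [cur]
  | h :: r => (cur ++ h) :: r

theorem set_append_singleton (acc : List (List Char)) (cur x : List Char) :
    (acc ++ [cur]).set acc.length x = acc ++ [x] := by
  induction acc with
  | nil => rfl
  | cons a t ih => simp [ih]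

theorem getD_append_singleton (acc : List (List Char)) (cur : List Char) :
    (acc ++ [cur]).getD acc.length [] = cur := by
  induction acc with
  | nil => rfl
  | cons a t ih => simpa using ih

theorem foldl_lastlineStep (s : List Char) : ∀ (acc : List (List Char)) (cur : List Char),
    (s.foldl lastlineStep (acc ++ [cur], acc.length)).1 = acc ++ consHead cur (splitNL s) := by
  induction s with
  | nil => intro acc cur; simp [consHead, splitNL]
  | cons c t ih =>
    intro acc cur
    by_cases hc : c = '\n'
    · have hstep : lastlineStep (acc ++ [cur], acc.length) c = ((acc ++ [cur]) ++ [[]], (acc ++ [cur]).length) := by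
        simp [lastlineStep, hc]
      rw [List.foldl_cons, hstep, ih (acc ++ [cur]) []]
      rcases h : splitNL t with _ | ⟨h0, r⟩
      · exact absurd h (splitNL_ne_nil t)
      · simp [splitNL, hc, h, consHead]
    · have hstep : lastlineStep (acc ++ [cur], acc.length) c = (acc ++ [cur ++ [c]], acc.length) := by
        simp [lastlineStep, hc, set_append_singleton, getD_append_singleton]
      rw [List.foldl_cons, hstep, ih acc (cur ++ [c])]
      rcases h : splitNL t with _ | ⟨h0, r⟩
      · exact absurd h (splitNL_ne_nil t)
      · simp [splitNL, hc, h, consHead]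

theorem args_eq_splitNL (s : List Char) :
    (s.foldl lastlineStep ([[]], 0)).1 = splitNL s := by
  have := foldl_lastlineStep s [] []
  simp only [List.nil_append, List.length_nil] at this
  rw [this]
  rcases h : splitNL s with _ | ⟨h0, r⟩
  · exact absurd h (splitNL_ne_nil s)
  · simp [consHead]

-- PySem.Chars.count with a single-character needle is List.count
theorem countgo_singleton (c : Char) : ∀ (fuel : Nat) (l : List Char) (acc : Nat),
    l.length ≤ fuel → PySem.Chars.count.go [c] fuel l acc = acc + l.count c := by
  intro fuel
  induction fuel with
  | zero => intro l acc h; rw [Nat.le_zero, List.length_eq_zero_iff] at h; subst h; simp [PySem.Chars.count.go]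
  | succ n ih =>
    intro l acc h
    cases l with
    | nil => simp [PySem.Chars.count.go]
    | cons a t =>
      rw [PySem.Chars.count.go]
      by_cases hca : c = a
      · have hp : [c].isPrefixOf (a :: t) = true := by simp [List.isPrefixOf, hca]
        rw [if_pos hp]
        simp only [List.length_cons] at h
        rw [ih _ _ (by simpa using Nat.le_of_succ_le_succ h)]
        simp [List.count_cons, hca.symm]
        omega
      · have hp : [c].isPrefixOf (a :: t) = false := by simp [List.isPrefixOf]; exact hca
        rw [if_neg (by simp [hp])]
        simp only [List.length_cons] at h
        rw [ih _ _ (Nat.le_of_succ_le_succ h)]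
        simp [List.count_cons]
        exact fun e => hca e.symm

theorem count_singleton (s : List Char) (c : Char) : PySem.Chars.count s [c] = s.count c := by
  rw [PySem.Chars.count]
  simp only [List.isEmpty_cons, if_false, Bool.false_eq_true]
  rw [countgo_singleton c s.length s 0 le_rfl]; omega

-- find points at n iff there is an occurrence at n and none earlier
theorem find_eq_of (s sb : List Char) (n : Nat) (h1 : sb <+: s.drop n)
    (h2 : ∀ i < n, ¬ sb <+: s.drop i) : PySem.Chars.find s sb = n := by
  have hin : PySem.Chars.isIn sb s = true :=
    (PySem.Chars.exists_prefix_drop_iff_isIn sb s).mp ⟨n, h1⟩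
  have hnn : 0 ≤ PySem.Chars.find s sb :=
    (PySem.Chars.find_nonneg_iff s sb).mpr ((PySem.Chars.isIn_iff_infix sb s).mp hin)
  obtain ⟨hocc, hmin⟩ := PySem.Chars.find_spec hnn
  have : (PySem.Chars.find s sb).toNat = n := by
    rcases Nat.lt_trichotomy (PySem.Chars.find s sb).toNat n with h | h | h
    · exact absurd hocc (h2 _ h)
    · exact h
    · exact absurd h1 (hmin n h)
  omega

-- an occurrence of sb inside the first line is an occurrence in the whole string at the same spot
theorem occ_of_infix_left (l₀ rest sb : List Char) (h : sb <:+: l₀) :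
    ∃ p, p ≤ l₀.length ∧ sb <+: (l₀ ++ '\n' :: rest).drop p := by
  obtain ⟨a, b, rfl⟩ := h
  refine ⟨a.length, by simp, ?_⟩
  rw [List.append_assoc, List.append_assoc, List.drop_left]
  exact ⟨b ++ '\n' :: rest, by simp⟩

-- a newline-free sb that is not inside the first line cannot start at p ≤ |l₀|
theorem no_occurrence_le (l₀ rest sb : List Char) (hnl : '\n' ∉ sb)
    (hnpre : ¬ sb <:+: l₀) (p : Nat) (hp : p ≤ l₀.length) :
    ¬ sb <+: (l₀ ++ '\n' :: rest).drop p := by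
  intro h
  have hsbne : sb ≠ [] := by rintro rfl; exact hnpre (List.nil_infix)
  rw [List.drop_append_of_le_length hp] at h
  by_cases hfit : p + sb.length ≤ l₀.length
  · -- sb fits inside l₀: sb is an infix of l₀
    have htake : sb = (l₀.drop p ++ '\n' :: rest).take sb.length := (List.prefix_iff_eq_take).mp h
    rw [List.take_append_of_le_length (by simp; omega)] at htake
    have : sb <+: l₀.drop p := htake ▸ List.take_prefix _ _
    exact hnpre (this.isInfix.trans (List.drop_suffix p l₀).isInfix)
  · -- sb covers position l₀.length: '\n' ∈ sb
    have hidx : l₀.length - p < sb.length := by omega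
    have hlen : sb.length ≤ (l₀.drop p ++ '\n' :: rest).length := h.length_le
    have := List.IsPrefix.getElem h hidx
    have hget : (l₀.drop p ++ '\n' :: rest)[l₀.length - p]'(by omega) = '\n' := by
      rw [List.getElem_append_right (by simp)]
      simp
    exact hnl ((this.trans hget) ▸ List.getElem_mem hidx)

theorem scan_shift (sb : List Char) (L : List (List Char)) : ∀ (i : Int),
    lastlineScan sb L i = (lastlineScan sb L 0).map (fun x => x + i) := by
  induction L with
  | nil => intro i; rfl
  | cons l L ih =>
    intro i
    by_cases hf : PySem.Chars.find l sb ≠ -1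
    · simp [lastlineScan, hf]
    · simp only [lastlineScan, if_neg hf]
      rw [ih (i + 1), ih (0 + 1)]
      cases lastlineScan sb L 0 <;> simp; omega

theorem scan_none (sb : List Char) (L : List (List Char)) (i : Int)
    (h : ∀ l ∈ L, ¬ sb <:+: l) : lastlineScan sb L i = none := by
  induction L generalizing i with
  | nil => rfl
  | cons l L ih =>
    have hf : PySem.Chars.find l sb = -1 :=
      (PySem.Chars.find_eq_neg_one_iff l sb).mpr (h l List.mem_cons_self)
    rw [lastlineScan, if_neg (by simp [hf])]
    exact ih _ (fun x hx => h x (List.mem_cons_of_mem _ hx))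

-- a newline-free sb occurring in the string but not in its first line occurs in the rest
theorem infix_append_cases (l₀ rest sb : List Char) (hnl : '\n' ∉ sb) (hnpre : ¬ sb <:+: l₀)
    (hinf : sb <:+: (l₀ ++ '\n' :: rest)) : sb <:+: rest := by
  have hin : PySem.Chars.isIn sb (l₀ ++ '\n' :: rest) = true :=
    (PySem.Chars.isIn_iff_infix _ _).mpr hinf
  obtain ⟨p, hocc⟩ := (PySem.Chars.exists_prefix_drop_iff_isIn sb _).mpr hin
  have hplt : l₀.length < p := by
    by_contra hle
    exact no_occurrence_le l₀ rest sb hnl hnpre p (by omega) hocc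
  have hdrop : (l₀ ++ '\n' :: rest).drop p = rest.drop (p - (l₀.length + 1)) := by
    rw [show l₀ ++ '\n' :: rest = (l₀ ++ ['\n']) ++ rest by simp,
        List.drop_append, List.drop_eq_nil_of_le (by simp; omega)]
    simp
  rw [hdrop] at hocc
  exact (PySem.Chars.isIn_iff_infix _ _).mp
    ((PySem.Chars.exists_prefix_drop_iff_isIn sb rest).mp ⟨_, hocc⟩)

-- the heart: A's per-line scan equals B's global find + newline counts, for newline-free sb
theorem main_lemma (s sb : List Char) (hnl : '\n' ∉ sb) :
    lastlineScan sb (splitNL s).dropLast 0 =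
      (if PySem.Chars.find s sb = -1 then none
       else if (s.take (PySem.Chars.find s sb).toNat).count '\n' = s.count '\n' then none
       else some (((s.take (PySem.Chars.find s sb).toNat).count '\n' : Nat) : Int)) := by
  induction hn : s.length using Nat.strong_induction_on generalizing s with
  | _ n ih =>
  subst hn
  by_cases hs : '\n' ∈ s
  · obtain ⟨l₀, rest, rfl, hl₀⟩ := exists_split hs
    have hcnt0 : l₀.count '\n' = 0 := List.count_eq_zero.mpr hl₀
    rw [splitNL_break _ _ hl₀, List.dropLast_cons_of_ne_nil (splitNL_ne_nil rest)]
    by_cases hpre : sb <:+: l₀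
    · -- the first line contains sub: A returns 0, B's first occurrence is before the first '\n'
      have hf0 : PySem.Chars.find l₀ sb ≠ -1 := (PySem.Chars.find_ne_neg_one_iff l₀ sb).mpr hpre
      rw [lastlineScan, if_pos hf0]
      obtain ⟨p, hp, hocc⟩ := occ_of_infix_left l₀ rest sb hpre
      have hnn : 0 ≤ PySem.Chars.find (l₀ ++ '\n' :: rest) sb :=
        (PySem.Chars.find_nonneg_iff _ sb).mpr
          ((PySem.Chars.isIn_iff_infix sb _).mp
            ((PySem.Chars.exists_prefix_drop_iff_isIn sb _).mp ⟨p, hocc⟩))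
      obtain ⟨hoccf, hmin⟩ := PySem.Chars.find_spec hnn
      have hle : (PySem.Chars.find (l₀ ++ '\n' :: rest) sb).toNat ≤ p := by
        by_contra hgt
        exact hmin p (by omega) hocc
      have htake : ((l₀ ++ '\n' :: rest).take (PySem.Chars.find (l₀ ++ '\n' :: rest) sb).toNat).count '\n' = 0 := by
        rw [List.take_append_of_le_length (by omega)]
        exact List.count_eq_zero.mpr (fun hm => hl₀ (List.mem_of_mem_take hm))
      have htot : (l₀ ++ '\n' :: rest).count '\n' = 1 + rest.count '\n' := by
        simp [List.count_append, hcnt0]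
        omega
      rw [if_neg (by omega), htake, htot, if_neg (by omega)]
      simp
    · -- the first line does not contain sub: shift everything one line / one newline
      have hf0 : PySem.Chars.find l₀ sb = -1 := (PySem.Chars.find_eq_neg_one_iff l₀ sb).mpr hpre
      rw [lastlineScan, if_neg (by simp [hf0]), scan_shift,
          ih rest.length (by simp; omega) rest rfl]
      have hsplit : l₀ ++ '\n' :: rest = (l₀ ++ ['\n']) ++ rest := by simp
      by_cases hfr : PySem.Chars.find rest sb = -1
      · -- not in the rest either: both sides none
        have hfs : PySem.Chars.find (l₀ ++ '\n' :: rest) sb = -1 := by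
          rw [PySem.Chars.find_eq_neg_one_iff]
          intro hinf
          exact ((PySem.Chars.find_eq_neg_one_iff rest sb).mp hfr)
            (infix_append_cases l₀ rest sb hnl hpre hinf)
        rw [if_pos hfr, if_pos hfs]
        rfl
      · -- in the rest at q: find s sb = |l₀| + 1 + q, counts shift by one newline
        have hnnr : 0 ≤ PySem.Chars.find rest sb := by
          have := PySem.Chars.neg_one_le_find rest sb
          omega
        obtain ⟨hoccr, hminr⟩ := PySem.Chars.find_spec hnnr
        have hfs_eq : PySem.Chars.find (l₀ ++ '\n' :: rest) sb
            = ((l₀.length + 1 + (PySem.Chars.find rest sb).toNat : Nat) : Int) := by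
          apply find_eq_of
          · rw [hsplit, show l₀.length + 1 + (PySem.Chars.find rest sb).toNat
                = (l₀ ++ ['\n']).length + (PySem.Chars.find rest sb).toNat by simp,
              List.drop_length_add_append]
            exact hoccr
          · intro i hi
            by_cases hil : i ≤ l₀.length
            · exact no_occurrence_le l₀ rest sb hnl hpre i hil
            · have hdrop : (l₀ ++ '\n' :: rest).drop i = rest.drop (i - (l₀.length + 1)) := by
                rw [hsplit, List.drop_append,
                    List.drop_eq_nil_of_le (by simp; omega)]
                simp
              rw [hdrop]
              exact hminr _ (by omega)
        have htoNat : (PySem.Chars.find (l₀ ++ '\n' :: rest) sb).toNat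
            = l₀.length + 1 + (PySem.Chars.find rest sb).toNat := by
          rw [hfs_eq, Int.toNat_natCast]
        have htake : (l₀ ++ '\n' :: rest).take (PySem.Chars.find (l₀ ++ '\n' :: rest) sb).toNat
            = l₀ ++ '\n' :: rest.take (PySem.Chars.find rest sb).toNat := by
          rw [htoNat, hsplit, show l₀.length + 1 + (PySem.Chars.find rest sb).toNat
                = (l₀ ++ ['\n']).length + (PySem.Chars.find rest sb).toNat by simp,
              List.take_length_add_append]
          simp
        have hcntt : ((l₀ ++ '\n' :: rest).take (PySem.Chars.find (l₀ ++ '\n' :: rest) sb).toNat).count '\n'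
            = 1 + (rest.take (PySem.Chars.find rest sb).toNat).count '\n' := by
          rw [htake]
          simp [List.count_append, hcnt0]
          omega
        have htot : (l₀ ++ '\n' :: rest).count '\n' = 1 + rest.count '\n' := by
          simp [List.count_append, hcnt0]
          omega
        have hfs_ne : ¬ PySem.Chars.find (l₀ ++ '\n' :: rest) sb = -1 := by
          rw [hfs_eq]; omega
        rw [if_neg hfs_ne, if_neg hfr, hcntt, htot]
        by_cases hc : (rest.take (PySem.Chars.find rest sb).toNat).count '\n' = rest.count '\n'
        · rw [if_pos hc, if_pos (by omega)]
          rfl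
        · rw [if_neg hc, if_neg (by omega)]
          simp
          ring
  · -- no newline in the string: A scans nothing, B's match (if any) is on the last line
    rw [splitNL_no_nl s hs]
    have htot : s.count '\n' = 0 := List.count_eq_zero.mpr hs
    have htk : ∀ m : Nat, (s.take m).count '\n' = 0 :=
      fun m => List.count_eq_zero.mpr (fun hm => hs (List.mem_of_mem_take hm))
    rw [show ([s] : List (List Char)).dropLast = [] from rfl]
    by_cases hf : PySem.Chars.find s sb = -1
    · rw [if_pos hf]; rfl
    · rw [if_neg hf, htot, htk, if_pos rfl]; rfl

theorem lastline_eq_alt (string sub : String) : lastline string sub = lastline_alt string sub := by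
  unfold lastline lastline_alt
  simp only [args_eq_splitNL]
  by_cases hmem : '\n' ∈ sub.toList
  · rw [if_pos ((PySem.Chars.isIn_iff_infix _ _).mpr ((List.singleton_infix_iff _ _).mpr hmem))]
    apply scan_none
    intro l hl hinf
    exact mem_splitNL_no_nl string.toList l ((List.dropLast_sublist _).subset hl)
      (hinf.subset hmem)
  · rw [if_neg (by
      intro hin
      exact hmem ((List.singleton_infix_iff _ _).mp ((PySem.Chars.isIn_iff_infix _ _).mp hin))),
      main_lemma string.toList sub.toList hmem]
    by_cases hf : PySem.Chars.find string.toList sub.toList = -1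
    · rw [if_pos hf, if_pos hf]
    · have h0 : 0 ≤ PySem.Chars.find string.toList sub.toList := by
        have := PySem.Chars.neg_one_le_find string.toList sub.toList
        omega
      rw [if_neg hf, if_neg hf, PySem.List.slice_to _ h0, count_singleton, count_singleton]
      by_cases hc : (string.toList.take (PySem.Chars.find string.toList sub.toList).toNat).count '\n'
          = string.toList.count '\n'
      · rw [if_pos hc, if_pos (by exact_mod_cast hc)]
      · rw [if_neg hc, if_neg (by exact_mod_cast hc)]

-- ===== VERDICT (by name: the statement is the Claim_ definition above) =====
theorem lastline_spec : Claim_equal_lastline := by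
  intro string sub _
  exact lastline_eq_alt string sub
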